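-- pv_equiv track=rewrite | github.com/df7cb/aoc | 2024/07b.py | evals
-- ===== SOURCE A (Python) =====
-- def evals(values):
--     if len(values) == 1:
--         yield values[0]
--     else:
--         for v in evals(values[:-1]):
--             yield v + values[-1]
--             yield v * values[-1]
--             yield int(str(v) + str(values[-1]))
-- ===== SOURCE B (Python) =====
-- def evals(values):
--     results = [values[0]]
--     for x in values[1:]:
--         new_results = []
--         for v in results:
--             new_results.append(v + x)
--             new_results.append(v * x)
--             new_results.append(int(str(v) + str(x)))
--         results = new_results
--     yield from results
-- ===== Notes on version B (the rewrite author's own statement) =====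
-- stated objective: alternative
-- what changed: Replaces A's recursion on values[:-1] (which rebuilds a sliced copy at every level and expands depth-first) with a single left-to-right iterative pass that maintains the list of partial results and rewrites it once per element; same emitted sequence and order.
import Mathlib
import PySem

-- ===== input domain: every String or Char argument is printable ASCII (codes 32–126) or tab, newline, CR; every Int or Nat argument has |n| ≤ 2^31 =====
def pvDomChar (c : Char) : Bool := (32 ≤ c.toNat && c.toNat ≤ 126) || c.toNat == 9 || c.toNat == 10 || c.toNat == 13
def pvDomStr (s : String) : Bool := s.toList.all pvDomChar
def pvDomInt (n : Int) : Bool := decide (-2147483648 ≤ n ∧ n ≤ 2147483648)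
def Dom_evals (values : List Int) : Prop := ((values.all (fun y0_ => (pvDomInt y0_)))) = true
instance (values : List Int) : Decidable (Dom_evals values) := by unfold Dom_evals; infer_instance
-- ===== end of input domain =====

-- B replaces A's recursion on values[:-1] with one iterative left-to-right pass maintaining
-- the list of partial results; equivalence is about the RETURN (materialised) sequence of the
-- Python generators.

-- int(str(v) + str(x)), shared literal subexpression of both sources (defined outside Pre_ only
-- when int() would raise ValueError; those inputs are excluded by Pre_evals).
def pvCat (v x : Int) : Int :=
  (PySem.Int.ofStr? (PySem.Int.toStr v ++ PySem.Int.toStr x)).getD 0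

-- ===== PORT A =====
def evals (values : List Int) : List Int :=
  if values.length = 1 then
    [(PySem.List.pyGet? values 0).getD 0]
  else if values = [] then []   -- totality guard: Python recurses forever here (RecursionError); outside Pre_evals
  else
    let last := (PySem.List.pyGet? values (-1)).getD 0
    (evals (PySem.List.slice values none (some (-1)))).flatMap
      (fun v => [v + last, v * last, pvCat v last])
termination_by values.length
decreasing_by
  simp only [PySem.List.slice_to_neg_one, List.length_dropLast]
  rename_i _ h2
  have : values.length ≠ 0 := fun h => h2 (List.eq_nil_of_length_eq_zero h)
  omega

-- ===== PORT B =====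
def evals_alt (values : List Int) : List Int :=
  match values with
  | [] => []   -- Python B raises IndexError here; outside Pre_evals
  | v0 :: rest =>
    rest.foldl
      (fun results x =>
        results.foldl (fun new_results v =>
          new_results ++ [v + x, v * x, pvCat v x]) [])
      [v0]

-- ===== PRECONDITION & SPEC =====
-- Pre_ excludes exactly the inputs where Python A raises: the empty list (RecursionError on
-- iteration) and lists with a negative element after the first (int(str(v)+str(x)) raises
-- ValueError because the '-' sign lands mid-string).
def Pre_evals (values : List Int) : Prop :=
  values ≠ [] ∧ ∀ x ∈ values.tail, 0 ≤ x
instance (values : List Int) : Decidable (Pre_evals values) := by unfold Pre_evals; infer_instance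

def pvWitness_evals : List Int := [-2, 3, 10]

def Spec_evals (values : List Int) (out : List Int) : Prop := out = evals_alt values
instance (values : List Int) (out : List Int) : Decidable (Spec_evals values out) := by unfold Spec_evals; infer_instance

-- ===== CLAIM (what is proved, stated in full; the proofs are below) =====
def Claim_equal_evals : Prop := ∀ (values : List Int), Dom_evals values → Pre_evals values → Spec_evals values (evals values)

-- ===== LEMMAS AND PROOFS =====

-- one expansion step, as B's inner loop computes it
lemma inner_step (results : List Int) (x : Int) :
    results.foldl (fun new_results v => new_results ++ [v + x, v * x, pvCat v x]) [] =
      results.flatMap (fun v => [v + x, v * x, pvCat v x]) := by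
  simpa using PySem.List.foldl_append_eq_flatMap
    (l := results) (acc := ([] : List Int)) (g := fun v => [v + x, v * x, pvCat v x])

lemma evals_eq_foldl (v0 : Int) (rest : List Int) :
    evals (v0 :: rest) =
      rest.foldl (fun results x => results.flatMap (fun v => [v + x, v * x, pvCat v x])) [v0] := by
  induction rest using List.reverseRecOn with
  | nil =>
      simp [evals, PySem.List.pyGet?, PySem.List.pyIdx?]
  | append_singleton r x ih =>
      rw [evals]
      have hlen : (v0 :: (r ++ [x])).length ≠ 1 := by simp
      have hne : (v0 :: (r ++ [x])) ≠ [] := by simp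
      simp only [if_neg hlen, if_neg hne]
      have hlast : PySem.List.pyGet? (v0 :: (r ++ [x])) (-1) = some x := by
        simpa using PySem.List.pyGet?_neg_one_append_singleton (xs := v0 :: r) (x := x)
      have hslice : PySem.List.slice (v0 :: (r ++ [x])) none (some (-1)) = v0 :: r := by
        rw [PySem.List.slice_to_neg_one,
          show v0 :: (r ++ [x]) = (v0 :: r) ++ [x] from rfl, List.dropLast_concat]
      rw [hlast, hslice, List.foldl_append, ih]
      simp only [List.foldl_cons, List.foldl_nil, Option.getD_some]

lemma evals_alt_eq (v0 : Int) (rest : List Int) :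
    evals_alt (v0 :: rest) =
      rest.foldl (fun results x => results.flatMap (fun v => [v + x, v * x, pvCat v x])) [v0] := by
  show rest.foldl
      (fun results x => results.foldl (fun new_results v =>
        new_results ++ [v + x, v * x, pvCat v x]) []) [v0] = _
  congr 1
  funext results x
  exact inner_step results x

-- ===== VERDICT (by name: the statement is the Claim_ definition above) =====
theorem evals_spec : Claim_equal_evals := by
  intro values _ hpre
  obtain ⟨hne, -⟩ := hpre
  cases values with
  | nil => exact absurd rfl hne
  | cons v0 rest =>
      unfold Spec_evals
      rw [evals_eq_foldl, evals_alt_eq]
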